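-- pv_equiv track=rewrite | github.com/santha22/PythonPrograms | GFG/Binary Search/capacityShipPackagesDdays.py | f
-- ===== SOURCE A (Python) =====
-- def f(arr, n, mid):
--     days, load = 1, 0
--     for i in range(n):
--         if load + arr[i] > mid:
--             days += 1
--             load = arr[i]
--
--         else:
--             load += arr[i]
--
--     return days
-- ===== SOURCE B (Python) =====
-- def _build(prefix, lo, hi):
--     # max segment tree over prefix[lo..hi]; node = (max, lo, hi, left, right)
--     if lo == hi:
--         return (prefix[lo], lo, hi, None, None)
--     m2 = (lo + hi) // 2
--     L = _build(prefix, lo, m2)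
--     R = _build(prefix, m2 + 1, hi)
--     return (max(L[0], R[0]), lo, hi, L, R)
--
-- def _first_exceed(node, lo, t):
--     # smallest index j >= lo in the node's range with prefix[j] > t, else None
--     mx, nlo, nhi, L, R = node
--     if mx <= t or nhi < lo:
--         return None
--     if L is None:
--         return nlo
--     r = _first_exceed(L, lo, t)
--     if r is None:
--         r = _first_exceed(R, lo, t)
--     return r
--
-- def f(arr, n, mid):
--     m = n if n > 0 else 0
--     prefix = [0]
--     s = 0
--     for i in range(m):
--         s = s + arr[i]
--         prefix.append(s)
--     if m == 0:
--         return 1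
--     tree = _build(prefix, 1, m)
--     days = 1
--     start, lo = 0, 1
--     while True:
--         j = _first_exceed(tree, lo, prefix[start] + mid)
--         if j is None:
--             return days
--         days += 1
--         start = j - 1
--         lo = j + 1
-- ===== Notes on version B (the rewrite author's own statement) =====
-- stated objective: alternative
-- what changed: Replaces A's single-pass load accumulator by prefix sums plus a max segment tree: each day's segment end is found as the first prefix index exceeding base+mid by a pruned tree search, jumping segment to segment instead of scanning package by package.
import Mathlib
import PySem

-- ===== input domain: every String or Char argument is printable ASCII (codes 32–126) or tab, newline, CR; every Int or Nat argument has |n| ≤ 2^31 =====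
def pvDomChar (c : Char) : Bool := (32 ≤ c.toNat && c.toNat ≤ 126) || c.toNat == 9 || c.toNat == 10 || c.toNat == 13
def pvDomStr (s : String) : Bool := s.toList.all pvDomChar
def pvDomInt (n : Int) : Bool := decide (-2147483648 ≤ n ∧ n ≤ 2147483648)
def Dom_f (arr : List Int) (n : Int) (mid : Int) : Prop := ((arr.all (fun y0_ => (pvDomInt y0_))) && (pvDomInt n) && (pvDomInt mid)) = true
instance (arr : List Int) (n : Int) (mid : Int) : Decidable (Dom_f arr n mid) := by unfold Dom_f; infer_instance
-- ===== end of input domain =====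

-- B replaces A's single-pass greedy accumulator by prefix sums plus a max segment tree queried for each day's breakpoint ("first prefix index exceeding base+mid"); alternative structure (the tree makes each breakpoint a logarithmic descent), same overall cost class on the greedy's worst case.


-- ===== PORT A =====
def f (arr : List Int) (n : Int) (mid : Int) : Int :=
  let st := (PySem.List.pyRange 0 n 1).foldl
    (fun (p : Int × Int) i =>
      let a := PySem.List.pyGetD arr i 0
      if p.2 + a > mid then (p.1 + 1, a) else (p.1, p.2 + a))
    (1, 0)
  st.1

-- ===== PORT B =====
-- Source B's segment-tree node: leaf idx val | node max lo hi left right (python tuple (mx, nlo, nhi, L, R), leaf has L = R = None)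
inductive PvTree where
  | leaf : Nat → Int → PvTree
  | node : Int → Nat → Nat → PvTree → PvTree → PvTree

def pvTreeMax : PvTree → Int
  | .leaf _ v => v
  | .node mx _ _ _ _ => mx

-- Source B's _build (python tests lo == hi; the 'lo < hi' form is the same test on every call Source B makes
-- — _build is only invoked with lo ≤ hi — and makes the recursion well-founded for Lean)
def pvBuild (P : List Int) (lo hi : Nat) : PvTree :=
  if h : lo < hi then
    let m2 := (lo + hi) / 2
    let L := pvBuild P lo m2
    let R := pvBuild P (m2 + 1) hi
    .node (max (pvTreeMax L) (pvTreeMax R)) lo hi L R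
  else .leaf lo (PySem.List.pyGetD P (lo : Int) 0)
termination_by hi - lo
decreasing_by all_goals omega

-- Source B's _first_exceed
def pvQuery : PvTree → Nat → Int → Option Nat
  | .leaf j v, lo, t => if v ≤ t ∨ j < lo then none else some j
  | .node mx _ hi L R, lo, t =>
    if mx ≤ t ∨ hi < lo then none
    else match pvQuery L lo t with
      | some j => some j
      | none => pvQuery R lo t

-- Source B's 'while True' loop (fuel only makes the recursion structural: lo grows by ≥ 1 per
-- iteration and the query yields nothing once lo exceeds the tree's range, so fuel = m + 1 is never exhausted)
def pvLoopB (tree : PvTree) (pfx : List Int) (mid : Int) : Nat → Nat → Nat → Int → Int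
  | 0, _, _, days => days
  | fuel + 1, s, lo, days =>
    match pvQuery tree lo (PySem.List.pyGetD pfx (s : Int) 0 + mid) with
    | none => days
    | some j => pvLoopB tree pfx mid fuel (j - 1) (j + 1) (days + 1)

def f_alt (arr : List Int) (n : Int) (mid : Int) : Int :=
  let m : Int := if n > 0 then n else 0
  let st := (PySem.List.pyRange 0 m 1).foldl
    (fun (st : List Int × Int) i =>
      (st.1 ++ [st.2 + PySem.List.pyGetD arr i 0], st.2 + PySem.List.pyGetD arr i 0))
    ([0], 0)
  if m = 0 then 1
  else
    let tree := pvBuild st.1 1 m.toNat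
    pvLoopB tree st.1 mid (m.toNat + 1) 0 1 1

-- ===== PRECONDITION & SPEC =====
-- A raises IndexError as soon as n exceeds len(arr); Pre_ excludes exactly those inputs.
def Pre_f (arr : List Int) (n : Int) (mid : Int) : Prop := n ≤ (arr.length : Int)
instance (arr : List Int) (n : Int) (mid : Int) : Decidable (Pre_f arr n mid) := by unfold Pre_f; infer_instance

def pvWitness_f : List Int × Int × Int := ([3, 1, 4, 2], 4, 5)

def Spec_f (arr : List Int) (n : Int) (mid : Int) (out : Int) : Prop := out = f_alt arr n mid
instance (arr : List Int) (n : Int) (mid : Int) (out : Int) : Decidable (Spec_f arr n mid out) := by unfold Spec_f; infer_instance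

-- ===== CLAIM (what is proved, stated in full; the proofs are below) =====
def Claim_equal_f : Prop := ∀ (arr : List Int) (n : Int) (mid : Int), Dom_f arr n mid → Pre_f arr n mid → Spec_f arr n mid (f arr n mid)

-- ===== LEMMAS AND PROOFS =====

-- A's loop body as a function on (days, load)
def pvStep (mid : Int) (p : Int × Int) (a : Int) : Int × Int :=
  if p.2 + a > mid then (p.1 + 1, a) else (p.1, p.2 + a)

-- running prefix sums starting from s (model of Source B's prefix construction)
def pvScan (s : Int) : List Int → List Int
  | [] => []
  | x :: xs => (s + x) :: pvScan (s + x) xs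

theorem pvFoldPrefix (l : List Int) : ∀ (acc : List Int) (s : Int),
    l.foldl (fun (st : List Int × Int) x => (st.1 ++ [st.2 + x], st.2 + x)) (acc, s)
      = (acc ++ pvScan s l, s + l.sum) := by
  induction l with
  | nil => intro acc s; simp [pvScan]
  | cons x xs ih => intro acc s; simp [pvScan, ih]; ring

theorem pvScan_getD (l : List Int) : ∀ (s : Int) (k : Nat), k < l.length →
    (pvScan s l).getD k 0 = s + (l.take (k + 1)).sum := by
  induction l with
  | nil => intro s k h; simp at h
  | cons x xs ih =>
    intro s k h
    cases k with
    | zero => simp [pvScan]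
    | succ k =>
      simp only [pvScan, List.getD_cons_succ, List.take_succ_cons, List.sum_cons]
      rw [ih (s + x) k (by simpa using h)]
      ring

-- the breakpoint search: first j in [jlo, m] with P[j] > t
def pvFirstVi (P : List Int) (t : Int) (m jlo : Nat) : Option Nat :=
  (List.range' jlo (m + 1 - jlo)).find? (fun j => decide (t < P.getD j 0))

-- number of further greedy breaks, given current segment base index and current position i (fuel-bounded)
def pvCount (P : List Int) (mid : Int) (m : Nat) : Nat → Nat → Nat → Int
  | 0, _, _ => 0
  | fuel + 1, base, i =>
    match pvFirstVi P (P.getD base 0 + mid) m (i + 1) with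
    | none => 0
    | some j => 1 + pvCount P mid m fuel (j - 1) j

theorem pvCount_zero (P : List Int) (mid : Int) (m base i : Nat) :
    pvCount P mid m 0 base i = 0 := rfl

theorem pvCount_succ (P : List Int) (mid : Int) (m fuel base i : Nat) :
    pvCount P mid m (fuel + 1) base i
      = match pvFirstVi P (P.getD base 0 + mid) m (i + 1) with
        | none => 0
        | some j => 1 + pvCount P mid m fuel (j - 1) j := rfl

theorem pvFirstVi_none_of_ge (P : List Int) (t : Int) (m jlo : Nat) (h : m < jlo) :
    pvFirstVi P t m jlo = none := by
  unfold pvFirstVi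
  have : m + 1 - jlo = 0 := by omega
  simp [this]

theorem pvFirstVi_bounds (P : List Int) (t : Int) (m jlo j : Nat)
    (h : pvFirstVi P t m jlo = some j) : jlo ≤ j ∧ j ≤ m := by
  have hmem := List.mem_of_find?_eq_some h
  rw [List.mem_range'_1] at hmem
  omega

-- peel the first searched index off the breakpoint search
theorem pvFirstVi_cons (P : List Int) (t : Int) (m k : Nat) (hk : k < m) :
    pvFirstVi P t m (k + 1)
      = if t < P.getD (k + 1) 0 then some (k + 1) else pvFirstVi P t m (k + 2) := by
  unfold pvFirstVi
  have h1 : m + 1 - (k + 1) = 1 + (m + 1 - (k + 2)) := by omega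
  rw [h1, ← List.range'_append (s := k + 1) (m := 1) (n := m + 1 - (k + 2)) (step := 1)]
  have h2 : k + 1 + 1 * 1 = k + 2 := by omega
  rw [h2, List.find?_append]
  have hr : List.range' (k + 1) 1 = [k + 1] := rfl
  rw [hr]
  by_cases hp : t < P.getD (k + 1) 0
  · rw [if_pos hp,
      show (List.find? (fun j => decide (t < P.getD j 0)) [k + 1]) = some (k + 1) from by
        simp [show t < P[k + 1]?.getD 0 from hp]]
    rfl
  · rw [if_neg hp,
      show (List.find? (fun j => decide (t < P.getD j 0)) [k + 1]) = none from by
        simp [show ¬ t < P[k + 1]?.getD 0 from hp]]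
    rfl

theorem pvCount_congr (P : List Int) (mid : Int) (m : Nat) :
    ∀ (fuel fuel' base i : Nat), m - i ≤ fuel → m - i ≤ fuel' →
    pvCount P mid m fuel base i = pvCount P mid m fuel' base i := by
  intro fuel
  induction fuel with
  | zero =>
    intro fuel' base i h h'
    have hnone : pvFirstVi P (P.getD base 0 + mid) m (i + 1) = none :=
      pvFirstVi_none_of_ge _ _ _ _ (by omega)
    cases fuel' with
    | zero => rfl
    | succ fuel' => rw [pvCount_zero, pvCount_succ, hnone]
  | succ fuel ih =>
    intro fuel' base i h h'
    cases fuel' with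
    | zero =>
      have hnone : pvFirstVi P (P.getD base 0 + mid) m (i + 1) = none :=
        pvFirstVi_none_of_ge _ _ _ _ (by omega)
      rw [pvCount_zero, pvCount_succ, hnone]
    | succ fuel' =>
      rw [pvCount_succ, pvCount_succ]
      cases hfv : pvFirstVi P (P.getD base 0 + mid) m (i + 1) with
      | none => rfl
      | some j =>
        have hb := pvFirstVi_bounds _ _ _ _ _ hfv
        simp only []
        rw [ih fuel' (j - 1) j (by omega) (by omega)]

-- skipping a non-violating position leaves the break count unchanged
theorem pvCount_skip (P : List Int) (mid : Int) (m : Nat) (fuel base k : Nat)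
    (hk : k < m) (hf : m - k ≤ fuel + 1)
    (hno : ¬ (P.getD base 0 + mid < P.getD (k + 1) 0)) :
    pvCount P mid m (fuel + 1) base k = pvCount P mid m fuel base (k + 1) := by
  have hsame : pvCount P mid m (fuel + 1) base k = pvCount P mid m (fuel + 1) base (k + 1) := by
    rw [pvCount_succ, pvCount_succ, pvFirstVi_cons P _ m k hk, if_neg hno]
  rw [hsame]
  exact pvCount_congr P mid m (fuel + 1) fuel base (k + 1) (by omega) (by omega)

-- a violating position at k+1 is the break found
theorem pvCount_break (P : List Int) (mid : Int) (m : Nat) (fuel base k : Nat)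
    (hk : k < m)
    (hyes : P.getD base 0 + mid < P.getD (k + 1) 0) :
    pvCount P mid m (fuel + 1) base k = 1 + pvCount P mid m fuel k (k + 1) := by
  rw [pvCount_succ, pvFirstVi_cons P _ m k hk, if_pos hyes]
  rfl

-- ===== A-side: the greedy fold counts exactly the prefix-sum breakpoints =====
theorem pvTakeSum_succ (lst : List Int) (k : Nat) (hk : k < lst.length) :
    (lst.take (k + 1)).sum = (lst.take k).sum + lst[k] :=
  List.sum_take_succ lst k hk

theorem pvFoldA' (lst P : List Int) (mid : Int)
    (hP : ∀ k, k ≤ lst.length → P.getD k 0 = (lst.take k).sum) :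
    ∀ (fuel k base : Nat) (d : Int), k ≤ lst.length → lst.length - k ≤ fuel →
    ((lst.drop k).foldl (pvStep mid) (d, P.getD k 0 - P.getD base 0)).1
      = d + pvCount P mid lst.length fuel base k := by
  intro fuel
  induction fuel with
  | zero =>
    intro k base d hk hf
    have hke : k = lst.length := by omega
    subst hke
    simp [List.drop_length, pvCount_zero]
  | succ fuel ih =>
    intro k base d hk hf
    by_cases hklt : k < lst.length
    · rw [List.drop_eq_getElem_cons hklt, List.foldl_cons]
      have hPk1 : P.getD (k + 1) 0 = P.getD k 0 + lst[k] := by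
        rw [hP (k + 1) (by omega), hP k (by omega), pvTakeSum_succ lst k hklt]
      by_cases hbr : P.getD k 0 - P.getD base 0 + lst[k] > mid
      · have hyes : P.getD base 0 + mid < P.getD (k + 1) 0 := by omega
        have hstep : pvStep mid (d, P.getD k 0 - P.getD base 0) lst[k]
            = (d + 1, P.getD (k + 1) 0 - P.getD k 0) := by
          simp only [pvStep]
          rw [if_pos hbr]
          simp only [Prod.mk.injEq]
          exact ⟨trivial, by rw [hPk1]; ring⟩
        rw [hstep, ih (k + 1) k (d + 1) (by omega) (by omega),
          pvCount_break P mid lst.length fuel base k hklt hyes]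
        ring
      · have hno : ¬ (P.getD base 0 + mid < P.getD (k + 1) 0) := by omega
        have hstep : pvStep mid (d, P.getD k 0 - P.getD base 0) lst[k]
            = (d, P.getD (k + 1) 0 - P.getD base 0) := by
          simp only [pvStep]
          rw [if_neg hbr]
          simp only [Prod.mk.injEq]
          exact ⟨trivial, by rw [hPk1]; ring⟩
        rw [hstep, ih (k + 1) base d (by omega) (by omega),
          pvCount_skip P mid lst.length fuel base k hklt (by omega) hno]
    · have hke : k = lst.length := by omega
      subst hke
      have hnone : pvFirstVi P (P.getD base 0 + mid) lst.length (lst.length + 1) = none :=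
        pvFirstVi_none_of_ge _ _ _ _ (by omega)
      rw [List.drop_length, List.foldl_nil, pvCount_succ, hnone]
      simp

-- ===== B-side: the segment tree answers the breakpoint query =====
theorem pvBuild_max (P : List Int) :
    ∀ (dep lo hi : Nat), hi - lo ≤ dep →
    ∀ j, lo ≤ j → j ≤ hi → P.getD j 0 ≤ pvTreeMax (pvBuild P lo hi) := by
  intro dep
  induction dep with
  | zero =>
    intro lo hi hd j h1 h2
    have : lo = hi := by omega
    subst this
    have : j = lo := by omega
    subst this
    rw [pvBuild, dif_neg (by omega)]
    simp [pvTreeMax]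
  | succ dep ih =>
    intro lo hi hd j h1 h2
    by_cases hlt : lo < hi
    · rw [pvBuild, dif_pos hlt]
      simp only [pvTreeMax]
      by_cases hj : j ≤ (lo + hi) / 2
      · exact le_trans (ih lo ((lo + hi) / 2) (by omega) j h1 hj) (le_max_left _ _)
      · exact le_trans (ih ((lo + hi) / 2 + 1) hi (by omega) j (by omega) h2) (le_max_right _ _)
    · have : lo = hi := by omega
      subst this
      have : j = lo := by omega
      subst this
      rw [pvBuild, dif_neg (by omega)]
      simp [pvTreeMax]

theorem pvQuery_eq (P : List Int) :
    ∀ (dep lo hi : Nat), hi - lo ≤ dep → lo ≤ hi → ∀ (bound : Nat) (t : Int),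
    pvQuery (pvBuild P lo hi) bound t
      = (List.range' lo (hi + 1 - lo)).find?
          (fun j => decide (t < P.getD j 0) && decide (bound ≤ j)) := by
  intro dep
  induction dep with
  | zero =>
    intro lo hi hd hlh bound t
    have : lo = hi := by omega
    subst this
    rw [pvBuild, dif_neg (by omega)]
    have : lo + 1 - lo = 1 := by omega
    rw [this]
    simp only [List.range', pvQuery, PySem.List.pyGetD_natCast, List.find?]
    by_cases h1 : t < P.getD lo 0
    · by_cases h2 : bound ≤ lo
      · rw [if_neg (by omega), decide_eq_true h1, decide_eq_true h2]; rfl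
      · rw [if_pos (by omega), decide_eq_false h2, Bool.and_false]
    · rw [if_pos (by omega), decide_eq_false h1, Bool.false_and]
  | succ dep ih =>
    intro lo hi hd hlh bound t
    by_cases hlt : lo < hi
    · rw [pvBuild, dif_pos hlt]
      simp only [pvQuery]
      have hm2 : (lo + hi) / 2 < hi ∧ lo ≤ (lo + hi) / 2 := by omega
      have hsplit : List.range' lo (hi + 1 - lo)
          = List.range' lo ((lo + hi) / 2 + 1 - lo) ++ List.range' ((lo + hi) / 2 + 1) (hi - (lo + hi) / 2) := by
        have harith : hi + 1 - lo = ((lo + hi) / 2 + 1 - lo) + (hi - (lo + hi) / 2) := by omega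
        have hstart : lo + 1 * ((lo + hi) / 2 + 1 - lo) = (lo + hi) / 2 + 1 := by omega
        rw [harith, ← List.range'_append, hstart]
      by_cases hpr : max (pvTreeMax (pvBuild P lo ((lo + hi) / 2))) (pvTreeMax (pvBuild P ((lo + hi) / 2 + 1) hi)) ≤ t ∨ hi < bound
      · rw [if_pos hpr]
        symm
        rw [List.find?_eq_none]
        intro j hj
        rw [List.mem_range'_1] at hj
        simp only [Bool.and_eq_true, decide_eq_true_eq, not_and]
        intro hPt hbj
        rcases hpr with hmx | hbd
        · have hle : P.getD j 0 ≤ max (pvTreeMax (pvBuild P lo ((lo + hi) / 2))) (pvTreeMax (pvBuild P ((lo + hi) / 2 + 1) hi)) := by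
            by_cases hjh : j ≤ (lo + hi) / 2
            · exact le_trans (pvBuild_max P dep lo ((lo + hi) / 2) (by omega) j hj.1 hjh) (le_max_left _ _)
            · exact le_trans (pvBuild_max P dep ((lo + hi) / 2 + 1) hi (by omega) j (by omega) (by omega)) (le_max_right _ _)
          omega
        · omega
      · rw [if_neg hpr]
        rw [hsplit, List.find?_append,
          ih lo ((lo + hi) / 2) (by omega) (by omega) bound t,
          ih ((lo + hi) / 2 + 1) hi (by omega) (by omega) bound t]
        cases (List.range' lo ((lo + hi) / 2 + 1 - lo)).find?
            (fun j => decide (t < P.getD j 0) && decide (bound ≤ j)) with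
        | none => simp
        | some j => simp
    · have : lo = hi := by omega
      subst this
      rw [pvBuild, dif_neg (by omega)]
      have h1 : lo + 1 - lo = 1 := by omega
      rw [h1]
      simp only [List.range', pvQuery, PySem.List.pyGetD_natCast, List.find?]
      by_cases hx1 : t < P.getD lo 0
      · by_cases hx2 : bound ≤ lo
        · rw [if_neg (by omega), decide_eq_true hx1, decide_eq_true hx2]; rfl
        · rw [if_pos (by omega), decide_eq_false hx2, Bool.and_false]
      · rw [if_pos (by omega), decide_eq_false hx1, Bool.false_and]

-- restrict the bounded search over [1,m] to the unbounded search over [bound,m]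
theorem pvFind_drop_bound (P : List Int) (t : Int) :
    ∀ (l : List Nat) (bound : Nat), (∀ j ∈ l, bound ≤ j) →
    l.find? (fun j => decide (t < P.getD j 0) && decide (bound ≤ j))
      = l.find? (fun j => decide (t < P.getD j 0)) := by
  intro l
  induction l with
  | nil => intro bound _; rfl
  | cons x xs ih =>
    intro bound h
    simp only [List.find?]
    have hx : bound ≤ x := h x (by simp)
    rw [show decide (bound ≤ x) = true by simp [hx]]
    rw [Bool.and_true]
    cases hc : decide (t < P.getD x 0) with
    | true => rfl
    | false => exact ih bound (fun j hj => h j (by simp [hj]))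

theorem pvQuery_firstVi (P : List Int) (m bound : Nat) (t : Int)
    (hm : 1 ≤ m) (hb1 : 1 ≤ bound) (hbm : bound ≤ m + 1) :
    pvQuery (pvBuild P 1 m) bound t = pvFirstVi P t m bound := by
  rw [pvQuery_eq P m 1 m (by omega) hm bound t]
  have hsplit : List.range' 1 (m + 1 - 1) = List.range' 1 (bound - 1) ++ List.range' bound (m + 1 - bound) := by
    have harith : m + 1 - 1 = (bound - 1) + (m + 1 - bound) := by omega
    have hstart : 1 + 1 * (bound - 1) = bound := by omega
    rw [harith, ← List.range'_append, hstart]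
  rw [hsplit, List.find?_append]
  have hleft : (List.range' 1 (bound - 1)).find?
      (fun j => decide (t < P.getD j 0) && decide (bound ≤ j)) = none := by
    rw [List.find?_eq_none]
    intro j hj
    rw [List.mem_range'_1] at hj
    simp only [Bool.and_eq_true, decide_eq_true_eq, not_and]
    intro _
    omega
  rw [hleft]
  rw [pvFind_drop_bound P t (List.range' bound (m + 1 - bound)) bound
    (fun j hj => (List.mem_range'_1.mp hj).1)]
  rfl

-- ===== B-side: the jumping loop counts the same breaks =====
theorem pvLoopB_count (P : List Int) (mid : Int) (m : Nat) (hm : 1 ≤ m) :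
    ∀ (fuel s lo : Nat) (days : Int), 1 ≤ lo → lo ≤ m + 1 → m + 2 - lo ≤ fuel →
    pvLoopB (pvBuild P 1 m) P mid fuel s lo days
      = days + pvCount P mid m (m + 1 - lo) s (lo - 1) := by
  intro fuel
  induction fuel with
  | zero => intro s lo days h1 h2 h3; omega
  | succ fuel ih =>
    intro s lo days h1 h2 h3
    simp only [pvLoopB, PySem.List.pyGetD_natCast]
    rw [pvQuery_firstVi P m lo (P.getD s 0 + mid) hm h1 h2]
    have hlo1 : lo - 1 + 1 = lo := by omega
    cases hfv : pvFirstVi P (P.getD s 0 + mid) m lo with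
    | none =>
      cases hml : m + 1 - lo with
      | zero => rw [pvCount_zero]; ring
      | succ w =>
        rw [pvCount_succ, hlo1, hfv]
        simp
    | some j =>
      have hb := pvFirstVi_bounds _ _ _ _ _ hfv
      have hred : (match (some j : Option Nat) with
          | none => days
          | some j' => pvLoopB (pvBuild P 1 m) P mid fuel (j' - 1) (j' + 1) (days + 1))
          = pvLoopB (pvBuild P 1 m) P mid fuel (j - 1) (j + 1) (days + 1) := rfl
      rw [hred, ih (j - 1) (j + 1) (days + 1) (by omega) (by omega) (by omega)]
      have hml : m + 1 - lo = (m + 1 - lo - 1) + 1 := by omega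
      rw [hml, pvCount_succ, hlo1, hfv]
      simp only [Nat.add_sub_cancel]
      rw [pvCount_congr P mid m (m + 1 - (j + 1)) (m + 1 - lo - 1) (j - 1) j (by omega) (by omega)]
      ring

-- index into arr agrees with index into its prefix of length m
theorem pvGetD_take (arr : List Int) (m : Nat) (j : Int) (hj0 : 0 ≤ j) (hjm : j < (m : Int))
    (hmlen : m ≤ arr.length) :
    PySem.List.pyGetD arr j 0 = PySem.List.pyGetD (arr.take m) j 0 := by
  have hjl : j < (arr.length : Int) := lt_of_lt_of_le hjm (by exact_mod_cast hmlen)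
  have hjl' : j < ((arr.take m).length : Int) := by
    simp [List.length_take, Nat.min_eq_left hmlen]; exact hjm
  rw [PySem.List.pyGetD_eq_getElem arr 0 hj0 hjl,
      PySem.List.pyGetD_eq_getElem (arr.take m) 0 hj0 hjl']
  simp [List.getElem_take]

-- ===== VERDICT (by name: the statement is the Claim_ definition above) =====
theorem f_spec : Claim_equal_f := by
  intro arr n mid _ hpre
  unfold Spec_f f f_alt
  by_cases hn : n ≤ 0
  · have hm0 : (if 0 < n then n else (0 : Int)) = 0 := if_neg (by omega)
    rw [hm0]
    simp [PySem.List.pyRange_one_eq_nil hn]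
  · rw [not_le] at hn
    have hm0 : (if 0 < n then n else (0 : Int)) = n := if_pos hn
    rw [hm0, if_neg (by omega)]
    set lst := arr.take n.toNat with hlst
    have hmlen : n.toNat ≤ arr.length := by
      unfold Pre_f at hpre; omega
    have hlen : ((lst.length : Nat) : Int) = n := by
      simp [hlst, List.length_take, Nat.min_eq_left hmlen]; omega
    have hm : lst.length = n.toNat := by omega
    -- both folds range over the same prefix lst of arr
    have hcongrA : (PySem.List.pyRange 0 n 1).foldl
        (fun (p : Int × Int) i =>
          let a := PySem.List.pyGetD arr i 0
          if p.2 + a > mid then (p.1 + 1, a) else (p.1, p.2 + a)) (1, 0)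
      = (PySem.List.pyRange 0 n 1).foldl
        (fun (p : Int × Int) i => pvStep mid p (PySem.List.pyGetD lst i 0)) (1, 0) := by
      apply PySem.List.foldl_congr_mem
      intro acc j hj
      rw [PySem.List.mem_pyRange_one] at hj
      simp only [pvStep]
      rw [pvGetD_take arr n.toNat j hj.1 (by omega) hmlen]
    have hcongrB : (PySem.List.pyRange 0 n 1).foldl
        (fun (st : List Int × Int) i =>
          (st.1 ++ [st.2 + PySem.List.pyGetD arr i 0], st.2 + PySem.List.pyGetD arr i 0)) ([0], 0)
      = (PySem.List.pyRange 0 n 1).foldl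
        (fun (st : List Int × Int) i =>
          (st.1 ++ [st.2 + PySem.List.pyGetD lst i 0], st.2 + PySem.List.pyGetD lst i 0)) ([0], 0) := by
      apply PySem.List.foldl_congr_mem
      intro acc j hj
      rw [PySem.List.mem_pyRange_one] at hj
      rw [pvGetD_take arr n.toNat j hj.1 (by omega) hmlen]
    rw [hcongrA, hcongrB]
    have hfoldA := PySem.List.foldl_pyRange_pyGetD lst 0 (pvStep mid) ((1 : Int), (0 : Int)) (le_refl 0)
    have hfoldB := PySem.List.foldl_pyRange_pyGetD lst 0
      (fun (st : List Int × Int) x => (st.1 ++ [st.2 + x], st.2 + x)) (([0] : List Int), (0 : Int)) (le_refl 0)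
    simp only [PySem.List.len, hlen] at hfoldA hfoldB
    rw [hfoldA, hfoldB]
    simp only [Int.toNat_zero, List.drop_zero]
    rw [pvFoldPrefix lst [0] 0]
    set P : List Int := [0] ++ pvScan 0 lst with hP
    have hPget : ∀ k, k ≤ lst.length → P.getD k 0 = (lst.take k).sum := by
      intro k hk
      cases k with
      | zero => simp [hP]
      | succ k =>
        simp only [hP, List.cons_append, List.nil_append, List.getD_cons_succ]
        rw [pvScan_getD lst 0 k (by omega)]
        simp
    -- A's value
    have hA : (lst.foldl (pvStep mid) (1, 0)).1 = 1 + pvCount P mid lst.length lst.length 0 0 := by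
      have h0 : P.getD 0 0 - P.getD 0 0 = 0 := by ring
      have := pvFoldA' lst P mid hPget lst.length 0 0 1 (by omega) (by omega)
      rw [h0] at this
      simpa using this
    -- B's value
    have hm1 : 1 ≤ lst.length := by omega
    have hB : pvLoopB (pvBuild P 1 n.toNat) P mid (n.toNat + 1) 0 1 1
        = 1 + pvCount P mid lst.length lst.length 0 0 := by
      rw [← hm]
      rw [pvLoopB_count P mid lst.length hm1 (lst.length + 1) 0 1 1 (by omega) (by omega) (by omega)]
      norm_num
    rw [hA, ← hB]
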